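-- pv_equiv track=rewrite | github.com/rodrigoibarra93/recuperatorio_primer_parcial | recuperatorio_primer_parical/funciones.py | definir_ganador
-- ===== SOURCE A (Python) =====
-- def definir_ganador(matriz):
--     """
--     Esta función identifica al ganador en una matriz de resultados.
--
--     Parametros:
--         matriz: Una matriz donde cada fila representa un participante y la última
--                 columna contiene el promedio.
--
--     Retorna:
--         Una lista que representa al ganador.
--
--     Descripción:
--     La función ordena la matriz de forma descendente según la puntuación en la última columna.
--     El primer elemento de la matriz ordenada (índice 0) será el ganador.
--
--     Pasos:
--     1. Se obtiene el número de filas de la matriz (número de participantes).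
--     2. Se realiza un algoritmo de ordenamiento por burbujeo para ordenar las filas de la matriz
--        de forma descendente según la puntuación.
--     3. El primer elemento de la matriz ordenada se asigna a la variable `ganador` y se devuelve.
--     """
--
--     numero_filas = len(matriz)  # Obtener el número de participantes
--
--     # Ordenar la matriz por puntuación de forma descendente (burbujeo)
--     for i in range(numero_filas):
--         for j in range(0, numero_filas - i - 1):
--             if matriz[j][-1] < matriz[j+1][-1]:  # Si el siguiente elemento tiene mayor puntuación
--                 # Intercambiar las filas completas
--                 for k in range(len(matriz[j])):
--                     aux = matriz[j][k]
--                     matriz[j][k] = matriz[j+1][k]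
--                     matriz[j+1][k] = aux
--
--     # El primer elemento de la matriz ordenada es el ganador
--     ganador = matriz[0]
--
--     return ganador
-- ===== SOURCE B (Python) =====
-- def definir_ganador(matriz):
--     # Single linear pass: keep the first row whose last-column value is maximal.
--     # (Unlike A, this does not sort `matriz` in place; only the return value matches.)
--     ganador = matriz[0]
--     for fila in matriz[1:]:
--         if fila[-1] > ganador[-1]:
--             ganador = fila
--     return ganador
-- ===== Notes on version B (the rewrite author's own statement) =====
-- stated objective: faster
-- what changed: A bubble-sorts the whole matrix in place (nested passes with element-wise row swaps) and returns row 0; B makes one linear pass keeping the first row whose last-column value is maximal (strict '>' preserves A's stable tie-breaking); B does not mutate the argument, the equivalence is about the return value.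
-- outside the precondition, e.g. on definir_ganador([[1], [5, 9]]): A returns [5], B returns [5, 9]
import Mathlib
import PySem

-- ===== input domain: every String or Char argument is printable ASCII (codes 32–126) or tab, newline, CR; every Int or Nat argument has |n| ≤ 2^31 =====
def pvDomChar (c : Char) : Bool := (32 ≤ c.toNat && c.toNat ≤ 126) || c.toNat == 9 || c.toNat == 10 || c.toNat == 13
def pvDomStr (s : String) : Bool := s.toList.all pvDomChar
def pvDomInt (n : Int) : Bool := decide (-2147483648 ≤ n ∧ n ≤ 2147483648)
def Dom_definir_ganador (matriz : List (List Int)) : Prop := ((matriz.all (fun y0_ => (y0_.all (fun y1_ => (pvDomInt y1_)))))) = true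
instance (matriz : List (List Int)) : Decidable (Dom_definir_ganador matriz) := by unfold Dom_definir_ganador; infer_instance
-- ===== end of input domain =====

-- B replaces A's in-place bubble sort by one linear pass keeping the first row with maximal
-- last-column value; A sorts `matriz` in place in Python and B does not mutate it, so the
-- equivalence proved here is about the return value only.

-- ===== PORT A =====
-- shared helper: `fila[-1]` (total form; inside Pre_ the rows indexed here are nonempty)
def pvKey (r : List Int) : Int := PySem.List.pyGetD r (-1) 0

-- innermost `for k` step: aux = matriz[j][k]; matriz[j][k] = matriz[j+1][k]; matriz[j+1][k] = aux
def pvSwapK (j : Int) (m : List (List Int)) (k : Int) : List (List Int) :=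
  let aux := PySem.List.pyGetD (PySem.List.pyGetD m j []) k 0
  let m1 := PySem.List.pySetD m j
      (PySem.List.pySetD (PySem.List.pyGetD m j []) k
        (PySem.List.pyGetD (PySem.List.pyGetD m (j+1) []) k 0))
  PySem.List.pySetD m1 (j+1) (PySem.List.pySetD (PySem.List.pyGetD m1 (j+1) []) k aux)

-- body of the `for j` loop: if matriz[j][-1] < matriz[j+1][-1], swap the rows element-wise
def pvBubbleJ (m : List (List Int)) (j : Int) : List (List Int) :=
  if pvKey (PySem.List.pyGetD m j []) < pvKey (PySem.List.pyGetD m (j+1) []) then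
    (PySem.List.pyRange 0 (PySem.List.len (PySem.List.pyGetD m j [])) 1).foldl (pvSwapK j) m
  else m

def definir_ganador (matriz : List (List Int)) : List Int :=
  let numero_filas := PySem.List.len matriz
  let m := (PySem.List.pyRange 0 numero_filas 1).foldl
    (fun m i => (PySem.List.pyRange 0 (numero_filas - i - 1) 1).foldl pvBubbleJ m) matriz
  PySem.List.pyGetD m 0 []

-- ===== PORT B =====
def definir_ganador_alt (matriz : List (List Int)) : List Int :=
  let ganador := PySem.List.pyGetD matriz 0 []
  (PySem.List.slice matriz (some 1) none).foldl
    (fun ganador fila => if pvKey ganador < pvKey fila then fila else ganador) ganador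

-- ===== PRECONDITION & SPEC =====
-- Pre_ excludes: the empty matrix and (with ≥ 2 rows) empty rows, where A raises IndexError;
-- and non-rectangular input, which is outside the natural domain of a results matrix
-- (A's element-wise swap there either raises or garbles the partially-swapped rows).
def Pre_definir_ganador (matriz : List (List Int)) : Prop :=
  matriz ≠ [] ∧ (∀ r ∈ matriz, r.length = matriz.headI.length) ∧
    (1 < matriz.length → matriz.headI ≠ [])
instance (matriz : List (List Int)) : Decidable (Pre_definir_ganador matriz) := by
  unfold Pre_definir_ganador; infer_instance

def pvWitness_definir_ganador : List (List Int) := [[1, 2], [3, 4], [0, 4]]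

def Spec_definir_ganador (matriz : List (List Int)) (out : List Int) : Prop := out = definir_ganador_alt matriz
instance (matriz : List (List Int)) (out : List Int) : Decidable (Spec_definir_ganador matriz out) := by unfold Spec_definir_ganador; infer_instance

-- ===== CLAIM (what is proved, stated in full; the proofs are below) =====
def Claim_equal_definir_ganador : Prop := ∀ (matriz : List (List Int)), Dom_definir_ganador matriz → Pre_definir_ganador matriz → Spec_definir_ganador matriz (definir_ganador matriz)

-- ===== LEMMAS AND PROOFS =====

-- B's fold step, named (definitionally equal to the lambda in definir_ganador_alt)
def pvStep (g f : List Int) : List Int := if pvKey g < pvKey f then f else g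

theorem pvStep_comm (a x y : List Int) (h : pvKey x < pvKey y) :
    pvStep (pvStep a x) y = pvStep (pvStep a y) x := by
  unfold pvStep
  split_ifs <;> first | rfl | omega

-- functional single bubble pass (left to right, swap when key left < key right)
def pvPass : List (List Int) → List (List Int)
  | [] => []
  | [x] => [x]
  | x :: y :: t => if pvKey x < pvKey y then y :: pvPass (x :: t) else x :: pvPass (y :: t)

theorem pvPass_perm (l : List (List Int)) : (pvPass l).Perm l := by
  induction l using pvPass.induct with
  | case1 => simp [pvPass]
  | case2 x => simp [pvPass]
  | case3 x y t h ih =>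
      rw [pvPass, if_pos h]
      exact (ih.cons y).trans (List.Perm.swap x y t)
  | case4 x y t h ih =>
      rw [pvPass, if_neg h]
      exact ih.cons x

theorem pvPass_ne_nil (l : List (List Int)) (h : l ≠ []) : pvPass l ≠ [] := by
  intro hnil
  apply h
  have hl := (pvPass_perm l).length_eq
  rw [hnil] at hl
  exact List.eq_nil_of_length_eq_zero hl.symm

theorem pvPass_getLast_le (l : List (List Int)) (e : List Int)
    (he : (pvPass l).getLast? = some e) : ∀ x ∈ l, pvKey e ≤ pvKey x := by
  induction l using pvPass.induct with
  | case1 => simp [pvPass] at he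
  | case2 x =>
      simp [pvPass] at he
      intro z hz
      simp at hz
      simp [← he, hz]
  | case3 x y t h ih =>
      rw [pvPass, if_pos h] at he
      have hp : pvPass (x :: t) ≠ [] := pvPass_ne_nil _ (by simp)
      obtain ⟨q, qs, hq⟩ := List.exists_cons_of_ne_nil hp
      rw [hq, List.getLast?_cons_cons, ← hq] at he
      have ihx := ih he
      intro z hz
      rcases List.mem_cons.mp hz with rfl | hz'
      · exact ihx z (by simp)
      · rcases List.mem_cons.mp hz' with rfl | hz''
        · exact le_of_lt (lt_of_le_of_lt (ihx x (by simp)) h)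
        · exact ihx z (by simp [hz''])
  | case4 x y t h ih =>
      rw [pvPass, if_neg h] at he
      have hp : pvPass (y :: t) ≠ [] := pvPass_ne_nil _ (by simp)
      obtain ⟨q, qs, hq⟩ := List.exists_cons_of_ne_nil hp
      rw [hq, List.getLast?_cons_cons, ← hq] at he
      have ihy := ih he
      intro z hz
      rcases List.mem_cons.mp hz with rfl | hz'
      · exact le_trans (ihy y (by simp)) (not_lt.mp h)
      · rcases List.mem_cons.mp hz' with rfl | hz''
        · exact ihy z (by simp)
        · exact ihy z (by simp [hz''])

theorem pvPass_foldl (l : List (List Int)) :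
    ∀ a, (pvPass l).foldl pvStep a = l.foldl pvStep a := by
  induction l using pvPass.induct with
  | case1 => intro a; simp [pvPass]
  | case2 x => intro a; simp [pvPass]
  | case3 x y t h ih =>
      intro a
      rw [pvPass, if_pos h, List.foldl_cons, ih (pvStep a y), List.foldl_cons,
        List.foldl_cons, List.foldl_cons, pvStep_comm a x y h]
  | case4 x y t h ih =>
      intro a
      rw [pvPass, if_neg h, List.foldl_cons, ih (pvStep a x), List.foldl_cons,
        List.foldl_cons, List.foldl_cons]

theorem pvFoldl_max (r : List (List Int)) (h : List Int)
    (hmax : ∀ y ∈ r, pvKey y ≤ pvKey h) : r.foldl pvStep h = h := by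
  induction r with
  | nil => rfl
  | cons y r ih =>
      rw [List.foldl_cons]
      have hy : pvStep h y = h := by
        unfold pvStep
        rw [if_neg (not_lt.mpr (hmax y (by simp)))]
      rw [hy]
      exact ih (fun z hz => hmax z (by simp [hz]))

theorem pvFoldr_min_le (ks : List Int) (i x : Int) (hx : x ∈ ks) : ks.foldr min i ≤ x := by
  induction ks with
  | nil => simp at hx
  | cons y ks ih =>
      rcases List.mem_cons.mp hx with rfl | hx'
      · exact min_le_left _ _
      · exact le_trans (min_le_right _ _) (ih hx')

theorem pvGetRow0 (pre s : List (List Int)) (a : List Int) :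
    PySem.List.pyGetD (pre ++ a :: s) (pre.length : Int) [] = a := by
  simp [PySem.List.pyGetD]

theorem pvGetRow1 (pre s : List (List Int)) (a b : List Int) :
    PySem.List.pyGetD (pre ++ a :: b :: s) ((pre.length : Int) + 1) [] = b := by
  have h := PySem.List.pyGet?_append_right pre (a :: b :: s) 1
  simp at h
  simp [PySem.List.pyGetD, h]

theorem pvSetRow0 (pre s : List (List Int)) (a v : List Int) :
    PySem.List.pySetD (pre ++ a :: s) (pre.length : Int) v = pre ++ v :: s := by
  rw [PySem.List.pySetD_natCast, List.set_append]
  simp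

theorem pvSetRow1 (pre s : List (List Int)) (a b v : List Int) :
    PySem.List.pySetD (pre ++ a :: b :: s) ((pre.length : Int) + 1) v = pre ++ a :: v :: s := by
  have h1 : ((pre.length : Int) + 1) = (((pre.length + 1 : Nat)) : Int) := by push_cast; ring
  rw [h1, PySem.List.pySetD_natCast, List.set_append]
  simp

theorem pvSwapK_step (pre s : List (List Int)) (a' b' : List Int) (K : Nat) :
    pvSwapK (pre.length : Int) (pre ++ a' :: b' :: s) (K : Int) =
      pre ++ (a'.set K (b'.getD K 0)) :: (b'.set K (a'.getD K 0)) :: s := by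
  simp only [pvSwapK, pvGetRow0, pvGetRow1, pvSetRow0, pvSetRow1]
  simp only [PySem.List.pyGetD_natCast, PySem.List.pySetD_natCast]

theorem pvInner_swap (pre s : List (List Int)) (a b : List Int) (hab : a.length = b.length)
    (K : Nat) (hK : K ≤ a.length) :
    (List.range K).foldl (fun m (k : Nat) => pvSwapK (pre.length : Int) m (k : Int)) (pre ++ a :: b :: s)
      = pre ++ (b.take K ++ a.drop K) :: (a.take K ++ b.drop K) :: s := by
  induction K with
  | zero => simp
  | succ K ih =>
      have hKa : K < a.length := by omega
      have hKb : K < b.length := by omega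
      rw [List.range_succ, List.foldl_append, ih (by omega)]
      simp only [List.foldl_cons, List.foldl_nil]
      rw [pvSwapK_step pre s _ _ K]
      have hlena : (a.take K).length = K := by
        simp [Nat.min_eq_left (le_of_lt hKa)]
      have hlenb : (b.take K).length = K := by
        simp [Nat.min_eq_left (le_of_lt hKb)]
      have hg1 : (a.take K ++ b.drop K).getD K 0 = b[K] := by
        rw [List.getD_eq_getElem?_getD, List.getElem?_append_right (by omega)]
        rw [hlena, Nat.sub_self, List.getElem?_drop, Nat.add_zero,
          List.getElem?_eq_getElem hKb, Option.getD_some]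
      have hg2 : (b.take K ++ a.drop K).getD K 0 = a[K] := by
        rw [List.getD_eq_getElem?_getD, List.getElem?_append_right (by omega)]
        rw [hlenb, Nat.sub_self, List.getElem?_drop, Nat.add_zero,
          List.getElem?_eq_getElem hKa, Option.getD_some]
      have hs1 : (b.take K ++ a.drop K).set K b[K] = b.take (K+1) ++ a.drop (K+1) := by
        rw [List.set_append, if_neg (by omega), hlenb, Nat.sub_self,
          List.drop_eq_getElem_cons hKa, List.set_cons_zero,
          ← List.take_concat_get hKb, List.concat_eq_append, List.append_assoc,
          List.singleton_append]
      have hs2 : (a.take K ++ b.drop K).set K a[K] = a.take (K+1) ++ b.drop (K+1) := by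
        rw [List.set_append, if_neg (by omega), hlena, Nat.sub_self,
          List.drop_eq_getElem_cons hKb, List.set_cons_zero,
          ← List.take_concat_get hKa, List.concat_eq_append, List.append_assoc,
          List.singleton_append]
      rw [hg1, hg2, hs1, hs2]

theorem pvBubbleJ_eq (pre s : List (List Int)) (a b : List Int) (hab : a.length = b.length) :
    pvBubbleJ (pre ++ a :: b :: s) (pre.length : Int) =
      pre ++ (if pvKey a < pvKey b then b :: a :: s else a :: b :: s) := by
  unfold pvBubbleJ
  rw [pvGetRow0, pvGetRow1]
  by_cases h : pvKey a < pvKey b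
  · rw [if_pos h, if_pos h]
    have hlen : PySem.List.len a = ((a.length : Nat) : Int) := by
      simp
    rw [hlen, PySem.List.pyRange_zero_natCast, List.foldl_map,
      pvInner_swap pre s a b hab a.length le_rfl]
    have e1 : b.take a.length = b := by rw [hab]; exact List.take_length
    have e2 : a.drop a.length = [] := List.drop_length
    have e3 : a.take a.length = a := List.take_length
    have e4 : b.drop a.length = [] := by rw [hab]; exact List.drop_length
    rw [e1, e2, e3, e4]
    simp
  · rw [if_neg h, if_neg h]

theorem pvJfold_pass (l : List (List Int)) : ∀ (pre s : List (List Int)),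
    (∀ x ∈ l, ∀ y ∈ l, x.length = y.length) →
    (PySem.List.pyRange (pre.length : Int) ((pre.length : Int) + (l.length : Int) - 1) 1).foldl
        pvBubbleJ (pre ++ l ++ s) = pre ++ pvPass l ++ s := by
  induction l using pvPass.induct with
  | case1 =>
      intro pre s _
      rw [PySem.List.pyRange_one_eq_nil (by simp)]
      simp [pvPass]
  | case2 x =>
      intro pre s _
      rw [PySem.List.pyRange_one_eq_nil
        (by simp only [List.length_cons, List.length_nil]; push_cast; omega)]
      simp [pvPass]
  | case3 x y t h ih =>
      intro pre s hrect
      have hx : x ∈ x :: y :: t := by simp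
      have hy : y ∈ x :: y :: t := by simp
      rw [PySem.List.pyRange_one_cons
        (by simp only [List.length_cons]; push_cast; omega), List.foldl_cons]
      have hm : pre ++ (x :: y :: t) ++ s = pre ++ x :: y :: (t ++ s) := by simp
      rw [hm, pvBubbleJ_eq pre (t ++ s) x y (hrect x hx y hy), if_pos h]
      have hpre : pre ++ y :: x :: (t ++ s) = (pre ++ [y]) ++ (x :: t) ++ s := by simp
      have hr1 : (pre.length : Int) + 1 = (((pre ++ [y]).length : Nat) : Int) := by
        simp
      have hr2 : (pre.length : Int) + ((x :: y :: t).length : Int) - 1 =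
          (((pre ++ [y]).length : Nat) : Int) + (((x :: t).length : Nat) : Int) - 1 := by
        simp; ring
      have hsub : ∀ u ∈ x :: t, u ∈ x :: y :: t := by
        intro u hu
        rcases List.mem_cons.mp hu with rfl | hu'
        · simp
        · simp [hu']
      rw [hpre, hr1, hr2, ih (pre ++ [y]) s
        (fun u hu v hv => hrect u (hsub u hu) v (hsub v hv))]
      rw [pvPass, if_pos h]
      simp
  | case4 x y t h ih =>
      intro pre s hrect
      have hx : x ∈ x :: y :: t := by simp
      have hy : y ∈ x :: y :: t := by simp
      rw [PySem.List.pyRange_one_cons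
        (by simp only [List.length_cons]; push_cast; omega), List.foldl_cons]
      have hm : pre ++ (x :: y :: t) ++ s = pre ++ x :: y :: (t ++ s) := by simp
      rw [hm, pvBubbleJ_eq pre (t ++ s) x y (hrect x hx y hy), if_neg h]
      have hpre : pre ++ x :: y :: (t ++ s) = (pre ++ [x]) ++ (y :: t) ++ s := by simp
      have hr1 : (pre.length : Int) + 1 = (((pre ++ [x]).length : Nat) : Int) := by
        simp
      have hr2 : (pre.length : Int) + ((x :: y :: t).length : Int) - 1 =
          (((pre ++ [x]).length : Nat) : Int) + (((y :: t).length : Nat) : Int) - 1 := by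
        simp; ring
      have hsub : ∀ u ∈ y :: t, u ∈ x :: y :: t := by
        intro u hu
        rcases List.mem_cons.mp hu with rfl | hu'
        · simp
        · simp [hu']
      rw [hpre, hr1, hr2, ih (pre ++ [x]) s
        (fun u hu v hv => hrect u (hsub u hu) v (hsub v hv))]
      rw [pvPass, if_neg h]
      simp

theorem pvOuter (n : Int) : ∀ (c : Nat) (p s : List (List Int)),
    p.length = c → (p.length : Int) + (s.length : Int) = n →
    (∀ x ∈ p ++ s, ∀ y ∈ p ++ s, x.length = y.length) →
    (∀ x ∈ p, ∀ y ∈ s, pvKey y ≤ pvKey x) →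
    (∀ e, s.head? = some e → ∀ y ∈ s, pvKey y ≤ pvKey e) →
    ∃ m', (PySem.List.pyRange (n - (c : Int)) n 1).foldl
        (fun m i => (PySem.List.pyRange 0 (n - i - 1) 1).foldl pvBubbleJ m) (p ++ s) = m' ∧
      m'.Perm (p ++ s) ∧
      (∀ a, m'.foldl pvStep a = (p ++ s).foldl pvStep a) ∧
      (∀ e, m'.head? = some e → ∀ y ∈ m', pvKey y ≤ pvKey e) := by
  intro c
  induction c with
  | zero =>
      intro p s hc hn hrect hcross hhead
      have hp : p = [] := List.eq_nil_of_length_eq_zero hc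
      subst hp
      rw [show n - ((0:Nat):Int) = n by simp, PySem.List.pyRange_one_eq_nil le_rfl]
      exact ⟨s, rfl, List.Perm.refl s, fun a => rfl, hhead⟩
  | succ c ih =>
      intro p s hc hn hrect hcross hhead
      have hpne : p ≠ [] := by intro h; rw [h] at hc; simp at hc
      rw [PySem.List.pyRange_one_cons (by omega), List.foldl_cons]
      have hend : n - (n - ((c+1 : Nat) : Int)) - 1 = 0 + ((p.length : Nat) : Int) - 1 := by
        omega
      have hj := pvJfold_pass p [] s (fun u hu v hv => hrect u (by simp [hu]) v (by simp [hv]))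
      simp only [List.nil_append] at hj
      rw [show ((([] : List (List Int)).length : Nat) : Int) = (0 : Int) by simp] at hj
      rw [hend, hj]
      have hpassne := pvPass_ne_nil p hpne
      obtain ⟨q, e, hqe⟩ : ∃ q e, pvPass p = q ++ [e] :=
        ⟨(pvPass p).dropLast, (pvPass p).getLast hpassne,
          (List.dropLast_append_getLast hpassne).symm⟩
      have hperm : (pvPass p).Perm p := pvPass_perm p
      have hqlen : q.length = c := by
        have hl := hperm.length_eq
        rw [hqe] at hl
        simp at hl
        omega
      have hele : ∀ x ∈ p, pvKey e ≤ pvKey x :=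
        pvPass_getLast_le p e (by rw [hqe]; exact List.getLast?_concat)
      have hmem : ∀ x, x ∈ q ++ [e] ↔ x ∈ p := by
        intro x
        rw [← hqe]
        exact hperm.mem_iff
      have heE : e ∈ p := (hmem e).mp (by simp)
      have heq' : q ++ e :: s = (q ++ [e]) ++ s := by simp
      have htr : ∀ x, x ∈ q ++ e :: s → x ∈ p ++ s := by
        intro x hxm
        rw [heq', List.mem_append] at hxm
        exact hxm.elim (fun hh => List.mem_append.mpr (Or.inl ((hmem x).mp hh)))
          (fun hh => List.mem_append.mpr (Or.inr hh))
      have hqsub : ∀ x ∈ q, x ∈ p := fun x hxq => (hmem x).mp (by simp [hxq])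
      rw [show pvPass p ++ s = q ++ e :: s by rw [hqe]; simp]
      rw [show n - ((c+1 : Nat) : Int) + 1 = n - ((c : Nat) : Int) by push_cast; ring]
      obtain ⟨m', hfold, hperm', hwin, hhead'⟩ := ih q (e :: s) hqlen
        (by
          have := hperm.length_eq
          rw [hqe] at this
          simp at this ⊢
          omega)
        (fun u hu v hv => hrect u (htr u hu) v (htr v hv))
        (by
          intro u hu v hv
          rcases List.mem_cons.mp hv with rfl | hv'
          · exact hele u (hqsub u hu)
          · exact hcross u (hqsub u hu) v hv')
        (by
          intro e' he' v hv
          have he2 : e' = e := (by simpa using he' : e = e').symm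
          rw [he2]
          rcases List.mem_cons.mp hv with rfl | hv'
          · exact le_refl _
          · exact hcross e heE v hv')
      refine ⟨m', hfold, ?_, ?_, hhead'⟩
      · refine hperm'.trans ?_
        rw [heq', ← hqe]
        exact hperm.append_right s
      · intro a
        rw [hwin a, heq', ← hqe, List.foldl_append, List.foldl_append, pvPass_foldl]

-- ===== VERDICT (by name: the statement is the Claim_ definition above) =====
theorem definir_ganador_spec : Claim_equal_definir_ganador := by
  unfold Claim_equal_definir_ganador
  intro matriz _ hpre
  unfold Spec_definir_ganador
  obtain ⟨hne, hrect, -⟩ := hpre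
  obtain ⟨m', hfold, hperm, hwin, hhead⟩ := pvOuter (matriz.length : Int) matriz.length matriz []
    rfl (by simp)
    (by
      intro u hu v hv
      rw [List.append_nil] at hu hv
      rw [hrect u hu, hrect v hv])
    (by simp) (by simp)
  rw [List.append_nil] at hperm hwin
  rw [List.append_nil] at hfold
  rw [show ((matriz.length : Int) - ((matriz.length : Nat) : Int)) = 0 by omega] at hfold
  simp only [definir_ganador, definir_ganador_alt, PySem.List.len_eq]
  rw [hfold]
  obtain ⟨h0, t0, rfl⟩ := List.exists_cons_of_ne_nil hne
  have hm'ne : m' ≠ [] := by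
    intro hh
    rw [hh] at hperm
    have := hperm.length_eq
    simp at this
  obtain ⟨h, r, rfl⟩ := List.exists_cons_of_ne_nil hm'ne
  -- the winner strictly below all keys, to start both folds
  obtain ⟨a0, ha0⟩ : ∃ a0 : List Int, ∀ x ∈ h0 :: t0, pvKey a0 < pvKey x := by
    refine ⟨[((h0 :: t0).map pvKey).foldr min (pvKey h0) - 1], ?_⟩
    intro x hx
    have hk : pvKey [((h0 :: t0).map pvKey).foldr min (pvKey h0) - 1] =
        ((h0 :: t0).map pvKey).foldr min (pvKey h0) - 1 := by
      simp [pvKey, PySem.List.pyGetD, PySem.List.pyGet?_neg_one]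
    rw [hk]
    have := pvFoldr_min_le ((h0 :: t0).map pvKey) (pvKey h0) (pvKey x)
      (List.mem_map_of_mem hx)
    omega
  have hA : (h :: r).foldl pvStep a0 = h := by
    rw [List.foldl_cons]
    have h1 : pvStep a0 h = h := by
      unfold pvStep
      rw [if_pos (ha0 h (hperm.subset (by simp)))]
    rw [h1]
    exact pvFoldl_max r h (fun y hy => hhead h rfl y (by simp [hy]))
  have hB : (h0 :: t0).foldl pvStep a0 = t0.foldl pvStep h0 := by
    rw [List.foldl_cons]
    have h1 : pvStep a0 h0 = h0 := by
      unfold pvStep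
      rw [if_pos (ha0 h0 (by simp))]
    rw [h1]
  have hval := hwin a0
  rw [hA, hB] at hval
  -- reduce both sides to the named forms
  simp only [PySem.List.pyGetD_zero_cons]
  rw [show (1 : Int) = ((1 : Nat) : Int) from rfl, PySem.List.slice_from_natCast]
  rw [show List.drop 1 (h0 :: t0) = t0 from rfl]
  rw [show (fun (ganador fila : List Int) =>
      if pvKey ganador < pvKey fila then fila else ganador) = pvStep from rfl]
  exact hval
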